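-- pv_equiv track=rewrite | github.com/molly-101/Algorithm | Algorithm_Prepare/Hacker_Rank/substring_test.py | paperCuttings
-- ===== SOURCE A (Python) =====
-- def paperCuttings(textLength, starting, ending):
--     dic = {}
--     arr = []
--     result = 0
--     for i, j in zip(starting, ending):
--         if i in dic:
--             if j not in dic[i]:
--                 dic[i][j] = True
--         else:
--             dic[i] = {j: True}
--
--     for i in dic.keys():
--         for j in dic[i].keys():
--             arr.append([i, j])
--
--     arr = sorted(arr, key=lambda x: (x[0], x[1]))
--     for i in range(len(arr)):
--         end = arr[i][1]
--         lt = i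
--         rt = len(arr) - 1
--         while lt <= rt:
--             mid = (lt + rt) // 2
--             if arr[mid][0] > end:
--                 rt = mid - 1
--             else:
--                 lt = mid + 1
--         if rt != lt:
--             result += len(arr) - rt - 1
--     return result
-- ===== SOURCE B (Python) =====
-- def paperCuttings(textLength, starting, ending):
--     pairs = sorted(set(zip(starting, ending)))
--     total = 0
--     for idx in range(len(pairs)):
--         e = pairs[idx][1]
--         for pair in pairs[idx:]:
--             if pair[0] > e:
--                 total += 1
--     return total
-- ===== Notes on version B (the rewrite author's own statement) =====
-- stated objective: simpler
-- what changed: A dedups (start,end) pairs into a dict of dicts and, after sorting, runs a hand-rolled binary search (while lt <= rt) for every index; B dedups with set(zip(...)), sorts, and for each index directly counts the pairs in the sorted tail slice whose start exceeds the current end.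
import Mathlib
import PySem

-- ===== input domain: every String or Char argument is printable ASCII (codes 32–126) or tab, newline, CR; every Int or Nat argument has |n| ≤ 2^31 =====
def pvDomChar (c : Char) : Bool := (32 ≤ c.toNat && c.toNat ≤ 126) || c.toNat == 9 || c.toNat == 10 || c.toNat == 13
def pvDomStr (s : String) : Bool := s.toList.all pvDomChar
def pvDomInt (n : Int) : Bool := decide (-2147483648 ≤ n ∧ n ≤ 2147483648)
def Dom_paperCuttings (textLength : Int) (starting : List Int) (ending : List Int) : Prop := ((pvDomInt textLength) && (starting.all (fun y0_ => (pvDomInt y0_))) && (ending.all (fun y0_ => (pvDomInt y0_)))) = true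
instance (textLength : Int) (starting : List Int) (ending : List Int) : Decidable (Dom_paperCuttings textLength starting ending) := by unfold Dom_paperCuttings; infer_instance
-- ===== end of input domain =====

-- B replaces A's dict-of-dicts dedup and hand-rolled per-index binary search by a set dedup
-- and a direct count over the sorted tail slice: shorter and plainer, not faster (objective: simpler).

-- ===== PORT A =====
-- the body of A's first loop (dedup into a dict of dicts)
def pcStep (dic : PySem.Dict Int (PySem.Dict Int Bool)) (p : Int × Int) : PySem.Dict Int (PySem.Dict Int Bool) :=
  if dic.contains p.1 then
    if (dic.getD p.1 PySem.Dict.empty).contains p.2 then dic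
    else dic.insert p.1 ((dic.getD p.1 PySem.Dict.empty).insert p.2 true)
  else dic.insert p.1 (PySem.Dict.empty.insert p.2 true)

-- A's inner 'while lt <= rt' binary search; returns the final (lt, rt)
def bsearchA (L : List (Int × Int)) (e : Int) (lt rt : Int) : Int × Int :=
  if h : lt ≤ rt then
    let mid := PySem.Int.floordiv (lt + rt) 2
    if (PySem.List.pyGetD L mid ((0 : Int), (0 : Int))).1 > e then bsearchA L e lt (mid - 1)
    else bsearchA L e (mid + 1) rt
  else (lt, rt)
termination_by (rt + 1 - lt).toNat
decreasing_by
  · obtain ⟨h1, h2⟩ := PySem.Int.floordiv_two_mid_bounds h; omega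
  · obtain ⟨h1, h2⟩ := PySem.Int.floordiv_two_mid_bounds h; omega

def paperCuttings (textLength : Int) (starting : List Int) (ending : List Int) : Int :=
  let dic := (starting.zip ending).foldl pcStep PySem.Dict.empty
  let arr := dic.keys.foldl (fun arr i =>
      ((dic.getD i PySem.Dict.empty).keys).foldl (fun arr j => arr ++ [(i, j)]) arr) []
  let arr := PySem.List.sorted arr (fun x : Int × Int => toLex x) false
  (PySem.List.pyRange 0 (PySem.List.len arr) 1).foldl (fun result i =>
     let e := (PySem.List.pyGetD arr i ((0 : Int), (0 : Int))).2
     let r := bsearchA arr e i (PySem.List.len arr - 1)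
     if r.2 ≠ r.1 then result + (PySem.List.len arr - r.2 - 1) else result) 0

-- ===== PORT B =====
def paperCuttings_alt (textLength : Int) (starting : List Int) (ending : List Int) : Int :=
  let pairs := PySem.List.sorted (PySem.Set.ofList (starting.zip ending)) (fun x : Int × Int => toLex x) false
  (PySem.List.pyRange 0 (PySem.List.len pairs) 1).foldl (fun total idx =>
     let e := (PySem.List.pyGetD pairs idx ((0 : Int), (0 : Int))).2
     (PySem.List.slice pairs (some idx) none).foldl
       (fun total pair => if pair.1 > e then total + 1 else total) total) 0

-- ===== PRECONDITION & SPEC =====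
def Spec_paperCuttings (textLength : Int) (starting : List Int) (ending : List Int) (out : Int) : Prop := out = paperCuttings_alt textLength starting ending
instance (textLength : Int) (starting : List Int) (ending : List Int) (out : Int) : Decidable (Spec_paperCuttings textLength starting ending out) := by unfold Spec_paperCuttings; infer_instance

-- ===== CLAIM (what is proved, stated in full; the proofs are below) =====
def Claim_equal_paperCuttings : Prop := ∀ (textLength : Int) (starting : List Int) (ending : List Int), Dom_paperCuttings textLength starting ending → Spec_paperCuttings textLength starting ending (paperCuttings textLength starting ending)

-- ===== LEMMAS AND PROOFS =====

-- the multiset of (start, end) pairs stored in A's dict of dicts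
def pcFlat (dic : PySem.Dict Int (PySem.Dict Int Bool)) : List (Int × Int) :=
  dic.items.flatMap (fun kv => kv.2.keys.map (fun j => (kv.1, j)))

-- well-formedness A's dict build maintains
def pcWF (dic : PySem.Dict Int (PySem.Dict Int Bool)) : Prop :=
  dic.keys.Nodup ∧ ∀ kv ∈ dic.items, kv.2.keys.Nodup

theorem mem_pcFlat (dic : PySem.Dict Int (PySem.Dict Int Bool)) (z : Int × Int) :
    z ∈ pcFlat dic ↔ ∃ inner, (z.1, inner) ∈ dic.items ∧ z.2 ∈ inner.keys := by
  unfold pcFlat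
  simp only [List.mem_flatMap, List.mem_map]
  constructor
  · rintro ⟨kv, hkv, j, hj, rfl⟩
    exact ⟨kv.2, by simpa using hkv, by simpa using hj⟩
  · rintro ⟨inner, hin, hk⟩
    exact ⟨(z.1, inner), hin, z.2, hk, rfl⟩

theorem getD_keys_nodup (dic : PySem.Dict Int (PySem.Dict Int Bool)) (k : Int) (h : pcWF dic) :
    ((dic.getD k PySem.Dict.empty).keys).Nodup := by
  rcases hc : dic.contains k with hf | ht
  · rw [PySem.Dict.getD_of_not_contains _ _ hc]
    exact PySem.Dict.nodup_keys_empty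
  · rw [PySem.Dict.contains_eq_isSome_get?] at hc
    rcases hv : dic.get? k with _ | v
    · rw [hv] at hc; simp at hc
    · rw [PySem.Dict.getD_of_get?_eq_some _ _ hv]
      exact h.2 _ (PySem.Dict.mem_items_of_get?_eq_some _ hv)

theorem pcWF_empty : pcWF PySem.Dict.empty := by
  constructor
  · exact PySem.Dict.nodup_keys_empty
  · intro kv h
    simp [PySem.Dict.empty] at h

theorem pcWF_step (dic : PySem.Dict Int (PySem.Dict Int Bool)) (p : Int × Int) (h : pcWF dic) :
    pcWF (pcStep dic p) := by
  unfold pcStep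
  split_ifs with h1 h2
  · exact h
  · refine ⟨PySem.Dict.nodup_keys_insert _ _ _ h.1, ?_⟩
    intro kv hkv
    rw [PySem.Dict.mem_items_insert] at hkv
    rcases hkv with rfl | ⟨hkv, _⟩
    · exact PySem.Dict.nodup_keys_insert _ _ _ (getD_keys_nodup dic p.1 h)
    · exact h.2 _ hkv
  · refine ⟨PySem.Dict.nodup_keys_insert _ _ _ h.1, ?_⟩
    intro kv hkv
    rw [PySem.Dict.mem_items_insert] at hkv
    rcases hkv with rfl | ⟨hkv, _⟩
    · exact PySem.Dict.nodup_keys_insert _ _ _ PySem.Dict.nodup_keys_empty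
    · exact h.2 _ hkv

theorem mem_pcFlat_step (dic : PySem.Dict Int (PySem.Dict Int Bool)) (p z : Int × Int) (h : pcWF dic) :
    z ∈ pcFlat (pcStep dic p) ↔ z ∈ pcFlat dic ∨ z = p := by
  unfold pcStep
  split_ifs with h1 h2
  · have hp : p ∈ pcFlat dic := by
      rw [PySem.Dict.contains_eq_isSome_get?] at h1
      rcases hv : dic.get? p.1 with _ | v
      · rw [hv] at h1; simp at h1
      · rw [mem_pcFlat]
        refine ⟨v, PySem.Dict.mem_items_of_get?_eq_some _ hv, ?_⟩
        rw [← PySem.Dict.contains_iff_mem_keys]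
        rw [← PySem.Dict.getD_of_get?_eq_some dic PySem.Dict.empty hv]
        exact h2
    constructor
    · exact Or.inl
    · rintro (hz | rfl)
      · exact hz
      · exact hp
  · have hveq : dic.get? p.1 = some (dic.getD p.1 PySem.Dict.empty) := by
      rw [PySem.Dict.contains_eq_isSome_get?] at h1
      rcases hv : dic.get? p.1 with _ | v
      · rw [hv] at h1; simp at h1
      · rw [PySem.Dict.getD_of_get?_eq_some dic PySem.Dict.empty hv]
    rw [mem_pcFlat, mem_pcFlat]
    constructor
    · rintro ⟨w, hw, hk⟩
      rw [PySem.Dict.mem_items_insert] at hw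
      rcases hw with hw | ⟨hw, _⟩
      · rw [Prod.mk.injEq] at hw
        obtain ⟨hz1, hwv⟩ := hw
        subst hwv
        rw [PySem.Dict.mem_keys_insert] at hk
        rcases hk with hk | hk
        · right; exact Prod.ext_iff.mpr ⟨hz1, hk⟩
        · left
          refine ⟨dic.getD p.1 PySem.Dict.empty, ?_, hk⟩
          rw [hz1]
          exact PySem.Dict.mem_items_of_get?_eq_some _ hveq
      · left; exact ⟨w, hw, hk⟩
    · rintro (⟨w, hw, hk⟩ | hzp)
      · by_cases hz1 : z.1 = p.1
        · have hwi : w = dic.getD p.1 PySem.Dict.empty := by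
            have hg := (PySem.Dict.get?_eq_some_iff_mem_items dic z.1 w h.1).mpr hw
            rw [hz1, hveq] at hg
            exact (Option.some.inj hg).symm
          refine ⟨(dic.getD p.1 PySem.Dict.empty).insert p.2 true, ?_, ?_⟩
          · rw [PySem.Dict.mem_items_insert]; left; rw [hz1]
          · rw [PySem.Dict.mem_keys_insert]; right; rw [← hwi]; exact hk
        · exact ⟨w, by rw [PySem.Dict.mem_items_insert]; right; exact ⟨hw, hz1⟩, hk⟩
      · rw [hzp]
        refine ⟨(dic.getD p.1 PySem.Dict.empty).insert p.2 true, ?_, ?_⟩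
        · rw [PySem.Dict.mem_items_insert]; left; rfl
        · rw [PySem.Dict.mem_keys_insert]; left; rfl
  · have h1' : dic.contains p.1 = false := by
      rcases hc : dic.contains p.1 with hf | ht
      · rfl
      · exact absurd hc h1
    rw [mem_pcFlat, mem_pcFlat]
    constructor
    · rintro ⟨w, hw, hk⟩
      rw [PySem.Dict.mem_items_insert] at hw
      rcases hw with hw | ⟨hw, _⟩
      · rw [Prod.mk.injEq] at hw
        obtain ⟨hz1, hwv⟩ := hw
        subst hwv
        rw [PySem.Dict.mem_keys_insert] at hk
        rcases hk with hk | hk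
        · right; exact Prod.ext_iff.mpr ⟨hz1, hk⟩
        · rw [PySem.Dict.keys_empty] at hk; exact absurd hk (List.not_mem_nil)
      · left; exact ⟨w, hw, hk⟩
    · rintro (⟨w, hw, hk⟩ | hzp)
      · have hz1 : z.1 ≠ p.1 := by
          rintro he
          rw [he] at hw
          have : p.1 ∈ dic.keys := PySem.Dict.mem_keys_of_mem_items dic hw
          rw [← PySem.Dict.contains_iff_mem_keys] at this
          rw [h1'] at this
          exact Bool.false_ne_true this
        exact ⟨w, by rw [PySem.Dict.mem_items_insert]; right; exact ⟨hw, hz1⟩, hk⟩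
      · rw [hzp]
        refine ⟨PySem.Dict.empty.insert p.2 true, ?_, ?_⟩
        · rw [PySem.Dict.mem_items_insert]; left; rfl
        · rw [PySem.Dict.mem_keys_insert]; left; rfl

theorem nodup_pcFlat (dic : PySem.Dict Int (PySem.Dict Int Bool)) (h : pcWF dic) :
    (pcFlat dic).Nodup := by
  unfold pcFlat
  rw [List.nodup_flatMap]
  constructor
  · intro kv hkv
    exact (h.2 _ hkv).map (fun a b hab => by simpa using congrArg Prod.snd hab)
  · have h1 := h.1
    simp only [PySem.Dict.keys] at h1
    have h2 : dic.items.Pairwise (fun a b => a.1 ≠ b.1) := by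
      have := (List.Pairwise.iff_of_mem (by intro a b _ _; exact Iff.rfl)).mp h1
      exact List.pairwise_map.mp h1
    refine h2.imp ?_
    intro a b hab
    simp only [Function.onFun]
    rw [List.disjoint_left]
    rintro x hxa hxb
    rw [List.mem_map] at hxa hxb
    obtain ⟨j1, _, rfl⟩ := hxa
    obtain ⟨j2, _, he⟩ := hxb
    exact hab (congrArg Prod.fst he).symm

theorem pcWF_fold (zs : List (Int × Int)) (dic : PySem.Dict Int (PySem.Dict Int Bool)) (h : pcWF dic) :
    pcWF (zs.foldl pcStep dic) := by
  induction zs generalizing dic with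
  | nil => exact h
  | cons a t ih => exact ih _ (pcWF_step _ _ h)

theorem mem_pcFlat_fold (zs : List (Int × Int)) (dic : PySem.Dict Int (PySem.Dict Int Bool)) (h : pcWF dic)
    (z : Int × Int) : z ∈ pcFlat (zs.foldl pcStep dic) ↔ z ∈ pcFlat dic ∨ z ∈ zs := by
  induction zs generalizing dic with
  | nil => simp
  | cons a t ih =>
    simp only [List.foldl_cons]
    rw [ih _ (pcWF_step _ _ h), mem_pcFlat_step _ _ _ h, List.mem_cons]
    tauto

theorem arr_eq_pcFlat (dic : PySem.Dict Int (PySem.Dict Int Bool)) (h : pcWF dic) :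
    dic.keys.foldl (fun arr i =>
      ((dic.getD i PySem.Dict.empty).keys).foldl (fun arr j => arr ++ [(i, j)]) arr) [] = pcFlat dic := by
  rw [PySem.List.foldl_congr_mem _ _
    (fun acc i => acc ++ ((dic.getD i PySem.Dict.empty).keys).map (fun j => (i, j))) _
    (by intro acc x _; exact PySem.List.foldl_append_singleton_eq_map _ _ _)]
  rw [PySem.List.foldl_append_eq_flatMap]
  unfold pcFlat
  rw [PySem.Dict.items_eq_map_keys dic h.1 PySem.Dict.empty, List.flatMap_map]
  rfl

theorem sortedA_eq_sortedB (zs : List (Int × Int)) :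
    PySem.List.sorted ((zs.foldl pcStep PySem.Dict.empty).keys.foldl (fun arr i =>
      (((zs.foldl pcStep PySem.Dict.empty).getD i PySem.Dict.empty).keys).foldl
        (fun arr j => arr ++ [(i, j)]) arr) []) (fun x : Int × Int => toLex x) false
    = PySem.List.sorted (PySem.Set.ofList zs) (fun x : Int × Int => toLex x) false := by
  have hw : pcWF (zs.foldl pcStep PySem.Dict.empty) := pcWF_fold _ _ pcWF_empty
  rw [arr_eq_pcFlat _ hw]
  apply PySem.List.sorted_eq_sorted_of_perm _ _ _ toLex.injective
  rw [List.perm_ext_iff_of_nodup (nodup_pcFlat _ hw) (PySem.Set.nodup_ofList zs)]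
  intro a
  rw [mem_pcFlat_fold _ _ pcWF_empty, PySem.Set.mem_ofList]
  have hne : ¬ a ∈ pcFlat PySem.Dict.empty := by
    rw [mem_pcFlat]
    rintro ⟨w, hw2, _⟩
    simp [PySem.Dict.empty] at hw2
  tauto

theorem bsearchA_spec (L : List (Int × Int)) (e lo : Int)
    (hmono : ∀ p q : Nat, (hpq : p ≤ q) → (hq : q < L.length) → (L[p]'(Nat.lt_of_le_of_lt hpq hq)).1 ≤ (L[q]).1) :
    ∀ fuel : Nat, ∀ lt rt : Int, (rt + 1 - lt).toNat ≤ fuel → 0 ≤ lo → lo ≤ lt → lt ≤ rt + 1 → rt < (L.length : Int) →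
    (∀ k : Nat, (hk : k < L.length) → lo ≤ (k : Int) → (k : Int) < lt → (L[k]).1 ≤ e) →
    (∀ k : Nat, (hk : k < L.length) → rt < (k : Int) → e < (L[k]).1) →
    (bsearchA L e lt rt).2 = (bsearchA L e lt rt).1 - 1 ∧ lo ≤ (bsearchA L e lt rt).1 ∧
      (bsearchA L e lt rt).1 ≤ (L.length : Int) ∧
      (∀ k : Nat, (hk : k < L.length) → lo ≤ (k : Int) → (k : Int) < (bsearchA L e lt rt).1 → (L[k]).1 ≤ e) ∧
      (∀ k : Nat, (hk : k < L.length) → (bsearchA L e lt rt).1 ≤ (k : Int) → e < (L[k]).1) := by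
  intro fuel
  induction fuel with
  | zero =>
    intro lt rt hfuel hlo0 hlo hlr hrt hlow hhigh
    have hltrt : ¬ lt ≤ rt := by omega
    rw [bsearchA, dif_neg hltrt]
    exact ⟨by omega, hlo, by omega, fun k hk h1 h2 => hlow k hk h1 h2,
      fun k hk h1 => hhigh k hk (by omega)⟩
  | succ n ih =>
    intro lt rt hfuel hlo0 hlo hlr hrt hlow hhigh
    by_cases hltrt : lt ≤ rt
    · rw [bsearchA]
      simp only [dif_pos hltrt]
      obtain ⟨hm1, hm2⟩ := PySem.Int.floordiv_two_mid_bounds hltrt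
      set mid := PySem.Int.floordiv (lt + rt) 2 with hmid
      have h0mid : 0 ≤ mid := by omega
      have hmidlen : mid < (L.length : Int) := by omega
      have hget : PySem.List.pyGetD L mid ((0 : Int), (0 : Int)) = L[mid.toNat]'(by omega) :=
        PySem.List.pyGetD_eq_getElem L _ h0mid hmidlen
      split_ifs with hcmp
      · rw [hget] at hcmp
        apply ih lt (mid - 1) (by omega) hlo0 hlo (by omega) (by omega) hlow
        intro k hk hk1
        have hmk : mid.toNat ≤ k := by omega
        have := hmono mid.toNat k hmk hk
        exact lt_of_lt_of_le hcmp this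
      · rw [hget] at hcmp
        push Not at hcmp
        apply ih (mid + 1) rt (by omega) hlo0 (by omega) (by omega) hrt ?_ hhigh
        intro k hk hk1 hk2
        by_cases hkl : (k : Int) < lt
        · exact hlow k hk hk1 hkl
        · have hkm : k ≤ mid.toNat := by omega
          exact le_trans (hmono k mid.toNat hkm (by omega)) hcmp
    · rw [bsearchA, dif_neg hltrt]
      exact ⟨by omega, hlo, by omega, fun k hk h1 h2 => hlow k hk h1 h2,
        fun k hk h1 => hhigh k hk (by omega)⟩

theorem countP_drop_split (L : List (Int × Int)) (p : Int × Int → Bool) (a b : Nat)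
    (hab : a ≤ b) (hb : b ≤ L.length)
    (h1 : ∀ k, (hk : k < L.length) → a ≤ k → k < b → p (L[k]) = false)
    (h2 : ∀ k, (hk : k < L.length) → b ≤ k → p (L[k]) = true) :
    (L.drop a).countP p = L.length - b := by
  have hsplit : L.drop a = (L.drop a).take (b - a) ++ L.drop b := by
    have h3 : (L.drop a).drop (b - a) = L.drop b := by
      rw [List.drop_drop]
      congr 1
      omega
    rw [← h3, List.take_append_drop]
  rw [hsplit, List.countP_append]
  have c1 : ((L.drop a).take (b - a)).countP p = 0 := by
    rw [List.countP_eq_zero]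
    intro x hx
    rw [List.mem_iff_getElem] at hx
    obtain ⟨m, hm, rfl⟩ := hx
    have hm2 : m < b - a := lt_of_lt_of_le hm (by simp)
    have hm3 : a + m < L.length := by
      have := List.length_drop (l := L) (i := a)
      omega
    rw [List.getElem_take, List.getElem_drop]
    simp [h1 (a + m) hm3 (by omega) (by omega)]
  have c2 : (L.drop b).countP p = (L.drop b).length := by
    rw [List.countP_eq_length]
    intro x hx
    rw [List.mem_iff_getElem] at hx
    obtain ⟨m, hm, rfl⟩ := hx
    have hm3 : b + m < L.length := by
      have := List.length_drop (l := L) (i := b)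
      omega
    rw [List.getElem_drop]
    exact h2 (b + m) hm3 (by omega)
  rw [c1, c2, List.length_drop]
  omega

theorem loops_eq (L : List (Int × Int))
    (hmono : ∀ p q : Nat, (hpq : p ≤ q) → (hq : q < L.length) → (L[p]'(Nat.lt_of_le_of_lt hpq hq)).1 ≤ (L[q]).1) :
    (PySem.List.pyRange 0 (PySem.List.len L) 1).foldl (fun result i =>
       let e := (PySem.List.pyGetD L i ((0 : Int), (0 : Int))).2
       let r := bsearchA L e i (PySem.List.len L - 1)
       if r.2 ≠ r.1 then result + (PySem.List.len L - r.2 - 1) else result) 0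
    = (PySem.List.pyRange 0 (PySem.List.len L) 1).foldl (fun total idx =>
       let e := (PySem.List.pyGetD L idx ((0 : Int), (0 : Int))).2
       (PySem.List.slice L (some idx) none).foldl
         (fun total pair => if pair.1 > e then total + 1 else total) total) 0 := by
  apply PySem.List.foldl_congr_mem
  intro acc i hi
  rw [PySem.List.mem_pyRange_one] at hi
  obtain ⟨h0i, hin⟩ := hi
  rw [PySem.List.len_eq] at hin
  dsimp only
  rw [PySem.List.len_eq]
  set e := (PySem.List.pyGetD L i ((0 : Int), (0 : Int))).2 with he
  obtain ⟨hr1, hr2, hr3, hr4, hr5⟩ :=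
    bsearchA_spec L e i hmono (((L.length : Int) - 1 + 1 - i).toNat) i ((L.length : Int) - 1)
      (le_refl _) h0i (le_refl _) (by omega) (by omega)
      (fun k hk h1 h2 => absurd h2 (by omega))
      (fun k hk h1 => absurd h1 (by omega))
  set r := bsearchA L e i ((L.length : Int) - 1) with hr
  rw [if_pos (by omega : r.2 ≠ r.1)]
  rw [PySem.List.slice_from _ h0i]
  rw [PySem.List.foldl_ite_add_one (p := fun pair : Int × Int => pair.1 > e)]
  rw [countP_drop_split L _ i.toNat r.1.toNat (by omega) (by omega)
    (fun k hk hak hbk => by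
      have := hr4 k hk (by omega) (by omega)
      simp only [decide_eq_false_iff_not]
      omega)
    (fun k hk hbk => by
      have := hr5 k hk (by omega)
      simp only [decide_eq_true_eq]
      omega)]
  have h1 : 0 ≤ r.1 := by omega
  have h2 : r.1 ≤ (L.length : Int) := hr3
  rw [hr1]
  omega

-- ===== VERDICT (by name: the statement is the Claim_ definition above) =====
theorem paperCuttings_spec : Claim_equal_paperCuttings := by
  intro textLength starting ending _
  simp only [Spec_paperCuttings, paperCuttings, paperCuttings_alt]
  rw [sortedA_eq_sortedB]
  apply loops_eq
  intro p q hpq hq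
  have := PySem.List.key_sorted_getElem_mono (PySem.Set.ofList (starting.zip ending))
    (fun x : Int × Int => toLex x) hpq hq
  rcases Prod.Lex.le_iff.mp this with hlt | ⟨heq, _⟩
  · exact le_of_lt hlt
  · exact le_of_eq heq
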